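-- pv_equiv track=rewrite | github.com/QuyenGocunn13/Nhom3_CloSpan_ProjectSource | models/clospan_models.py | run_clospan
-- ===== SOURCE A (Python) =====
-- def run_clospan(sequences, minsup):
--     from collections import defaultdict
--
--     def count_support(pattern, sequences):
--         """Đếm support của pattern bằng cách tìm subsequence trong các chuỗi"""
--         count = 0
--         for seq in sequences:
--             if is_subsequence(pattern, seq):
--                 count += 1
--         return count
--
--     def is_subsequence(pattern, sequence):
--         """Kiểm tra pattern có là subsequence của sequence không"""
--         seq_iter = iter(sequence)
--         return all(any(item in seq_iter for item in pat) for pat in pattern)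
--
--     def build_projected_db(pattern, sequences):
--         """Tạo projected database chứa các phần đuôi còn lại sau pattern"""
--         projected = []
--         for seq in sequences:
--             seq_iter = iter(seq)
--             for i, pat_item in enumerate(pattern):
--                 for item in seq_iter:
--                     if item == pat_item:
--                         break
--                 else:
--                     break
--             else:
--                 remaining = list(seq_iter)
--                 if remaining:
--                     projected.append(remaining)
--         return projected
--
--     def is_closed(current_pattern, current_sup, closed_dict):
--         """Kiểm tra xem pattern hiện tại có bị bao bởi pattern dài hơn cùng support không"""
--         for other_pat, other_sup in closed_dict.items():
--             if len(other_pat) > len(current_pattern) and other_sup == current_sup: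
--                 if is_subsequence(current_pattern, other_pat):
--                     return False
--         return True
--
--     def extend_pattern(prefix, projected_db, closed_dict):
--         """Hàm đệ quy để mở rộng prefix"""
--         items_count = defaultdict(int)
--
--         # Đếm các item tiếp theo có thể xuất hiện
--         for seq in projected_db:
--             used = set()
--             for itemset in seq:
--                 for item in itemset:
--                     if item not in used:
--                         items_count[frozenset([item])] += 1
--                         used.add(item)
--
--         for itemset_frozen, count in items_count.items():
--             if count >= minsup:
--                 new_pattern = prefix + [list(itemset_frozen)]
--                 new_projected = build_projected_db(new_pattern, sequences)
--                 if is_closed(new_pattern, count, closed_dict):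
--                     closed_dict[tuple(tuple(i) for i in new_pattern)] = count
--                 extend_pattern(new_pattern, new_projected, closed_dict)
--
--     # Bắt đầu
--     closed_patterns = {}
--     extend_pattern([], sequences, closed_patterns)
--     return closed_patterns
-- ===== SOURCE B (Python) =====
-- def run_clospan(sequences, minsup):
--     # Incremental projection: each pattern's projected DB is derived from its
--     # parent's projected DB (one scan for the new singleton itemset), instead of
--     # re-matching the whole pattern against every full sequence at every node.
--     result = {}
--
--     def frequent_items(db):
--         counts = {}
--         for seq in db:
--             seen = set()
--             for itemset in seq:
--                 for item in itemset:
--                     if item not in seen: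
--                         seen.add(item)
--                         counts[item] = counts.get(item, 0) + 1
--         return counts
--
--     def tail_after(x, seq):
--         it = iter(seq)
--         for itemset in it:
--             if itemset == [x]:
--                 return list(it)
--         return None
--
--     def mine(prefix, db):
--         for x, c in frequent_items(db).items():
--             if c >= minsup:
--                 pat = prefix + ((x,),)
--                 result[pat] = c
--                 child = []
--                 for seq in db:
--                     rest = tail_after(x, seq)
--                     if rest:
--                         child.append(rest)
--                 mine(pat, child)
--
--     mine((), sequences)
--     return result
-- ===== Notes on version B (the rewrite author's own statement) =====
-- stated objective: faster
-- what changed: B builds each pattern's projected database incrementally from the parent's projected database with a single scan per sequence tail, instead of A's re-matching the whole pattern against every full sequence at every node, and drops A's closedness filter and support counter, which are dead code (is_subsequence compares ints to lists, so it is constantly False and is_closed constantly True; count_support is never called).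
import Mathlib
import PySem

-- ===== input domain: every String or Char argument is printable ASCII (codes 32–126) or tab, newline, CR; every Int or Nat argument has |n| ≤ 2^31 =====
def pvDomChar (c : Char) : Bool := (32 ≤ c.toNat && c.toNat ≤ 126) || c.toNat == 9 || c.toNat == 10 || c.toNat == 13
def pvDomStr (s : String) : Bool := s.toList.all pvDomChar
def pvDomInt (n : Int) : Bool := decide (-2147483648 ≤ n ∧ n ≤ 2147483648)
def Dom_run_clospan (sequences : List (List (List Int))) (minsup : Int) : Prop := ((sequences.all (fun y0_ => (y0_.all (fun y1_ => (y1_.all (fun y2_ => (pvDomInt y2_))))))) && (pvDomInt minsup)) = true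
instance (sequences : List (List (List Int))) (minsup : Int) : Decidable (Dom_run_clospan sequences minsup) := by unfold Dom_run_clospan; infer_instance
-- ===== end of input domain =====

-- B replaces A's per-pattern rebuild of the projected database from the full
-- sequence list (and A's dead closedness scan) by an incremental one-scan
-- projection of the parent's projected database; measured faster.
-- Recursion in both ports is made total by a fuel argument (pvFuel, always
-- sufficient: recursion depth is bounded by the longest sequence + 1).

-- ===== PORT A =====
-- Python's 'item in seq_iter' compares an Int item with List-Int itemsets;
-- Python's cross-type '==' is constantly False there (exact port of that fact):
def pvEqIntItemset (_item : Int) (_itemset : List Int) : Bool := false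

-- 'item in seq_iter': scan the iterator (consuming it) for an element == item
def pvInIter (item : Int) : List (List Int) → Bool × List (List Int)
  | [] => (false, [])
  | s :: rest => if pvEqIntItemset item s then (true, rest) else pvInIter item rest

-- any(item in seq_iter for item in pat), threading the iterator
def pvAnyIn : List Int → List (List Int) → Bool × List (List Int)
  | [], it => (false, it)
  | i :: is', it =>
    match pvInIter i it with
    | (true, it') => (true, it')
    | (false, it') => pvAnyIn is' it'

-- is_subsequence(pattern, sequence): all(any(item in seq_iter for item in pat) for pat in pattern)
def isSubsequenceA : List (List Int) → List (List Int) → Bool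
  | [], _ => true
  | pat :: pats, it =>
    match pvAnyIn pat it with
    | (true, it') => isSubsequenceA pats it'
    | (false, _) => false

-- inner loop of build_projected_db: scan seq_iter for an itemset == pat_item
def matchOne (patItem : List Int) : List (List Int) → Option (List (List Int))
  | [] => none
  | s :: rest => if s == patItem then some rest else matchOne patItem rest

-- the for/else ladder over the pattern (none = some pat_item not found)
def matchAll : List (List Int) → List (List Int) → Option (List (List Int))
  | [], it => some it
  | p :: ps, it =>
    match matchOne p it with
    | none => none
    | some it' => matchAll ps it'

-- build_projected_db(pattern, sequences)
def buildProjectedDb (pattern : List (List Int)) : List (List (List Int)) → List (List (List Int))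
  | [] => []
  | seq :: rest =>
    match matchAll pattern seq with
    | some remaining =>
        if remaining.isEmpty then buildProjectedDb pattern rest
        else remaining :: buildProjectedDb pattern rest
    | none => buildProjectedDb pattern rest

-- is_closed: loop over closed_dict.items()
def isClosedGo (cur : List (List Int)) (sup : Int) : List (List (List Int) × Int) → Bool
  | [] => true
  | (otherPat, otherSup) :: rest =>
    if decide (otherPat.length > cur.length) && (otherSup == sup) then
      if isSubsequenceA cur otherPat then false else isClosedGo cur sup rest
    else isClosedGo cur sup rest

def isClosedA (cur : List (List Int)) (sup : Int) (d : PySem.Dict (List (List Int)) Int) : Bool :=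
  isClosedGo cur sup d.items

-- items_count: defaultdict(int) keyed by frozenset([item]) — a singleton frozenset
-- is represented by its element; 'used' is a Python set
def countItemsA (db : List (List (List Int))) : PySem.Dict Int Int :=
  db.foldl (fun counts seq =>
      (seq.foldl (fun (st : PySem.Dict Int Int × PySem.Set Int) itemset =>
          itemset.foldl (fun st item =>
              if PySem.Set.contains st.2 item then st
              else (st.1.modify item 0 (· + 1), PySem.Set.add st.2 item)) st)
        (counts, (PySem.Set.empty : PySem.Set Int))).1)
    PySem.Dict.empty

-- fuel for the recursion of both ports (a totality guard only; depth of the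
-- Python recursion is at most the longest sequence's length + 1)
def pvFuel (sequences : List (List (List Int))) : Nat :=
  (sequences.map List.length).sum + 2

-- extend_pattern
def extendA (sequences : List (List (List Int))) (minsup : Int) :
    Nat → List (List Int) → List (List (List Int)) →
    PySem.Dict (List (List Int)) Int → PySem.Dict (List (List Int)) Int
  | 0, _, _, d => d
  | fuel + 1, pref, db, d =>
    (countItemsA db).items.foldl (fun d xc =>
      if xc.2 ≥ minsup then
        let newPattern := pref ++ [[xc.1]]
        let newProjected := buildProjectedDb newPattern sequences
        let d' := if isClosedA newPattern xc.2 d then d.insert newPattern xc.2 else d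
        extendA sequences minsup fuel newPattern newProjected d'
      else d) d

def run_clospan (sequences : List (List (List Int))) (minsup : Int) : List (List (List Int) × Int) :=
  (extendA sequences minsup (pvFuel sequences) [] sequences PySem.Dict.empty).items

-- ===== PORT B =====
-- tail_after(x, seq): suffix after the first itemset == [x], none if absent
def tailAfter (x : Int) : List (List Int) → Option (List (List Int))
  | [] => none
  | s :: rest => if s == [x] then some rest else tailAfter x rest

-- frequent_items(db): per-sequence first-occurrence counting
def freqItemsB (db : List (List (List Int))) : PySem.Dict Int Int :=
  db.foldl (fun counts seq =>
      (seq.foldl (fun (st : PySem.Dict Int Int × PySem.Set Int) itemset =>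
          itemset.foldl (fun st item =>
              if PySem.Set.contains st.2 item then st
              else (st.1.insert item (st.1.getD item 0 + 1), PySem.Set.add st.2 item)) st)
        (counts, (PySem.Set.empty : PySem.Set Int))).1)
    PySem.Dict.empty

-- the child-db loop of mine: project the PARENT projected db by one item
def projectDb (x : Int) : List (List (List Int)) → List (List (List Int))
  | [] => []
  | seq :: rest =>
    match tailAfter x seq with
    | some r => if r.isEmpty then projectDb x rest else r :: projectDb x rest
    | none => projectDb x rest

-- mine(pref, db)
def mineB (minsup : Int) :
    Nat → List (List Int) → List (List (List Int)) →
    PySem.Dict (List (List Int)) Int → PySem.Dict (List (List Int)) Int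
  | 0, _, _, d => d
  | fuel + 1, pref, db, d =>
    (freqItemsB db).items.foldl (fun d xc =>
      if xc.2 ≥ minsup then
        mineB minsup fuel (pref ++ [[xc.1]]) (projectDb xc.1 db)
          (d.insert (pref ++ [[xc.1]]) xc.2)
      else d) d

def run_clospan_alt (sequences : List (List (List Int))) (minsup : Int) : List (List (List Int) × Int) :=
  (mineB minsup (pvFuel sequences) [] sequences PySem.Dict.empty).items

-- ===== PRECONDITION & SPEC =====
def Spec_run_clospan (sequences : List (List (List Int))) (minsup : Int) (out : List (List (List Int) × Int)) : Prop := out = run_clospan_alt sequences minsup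
instance (sequences : List (List (List Int))) (minsup : Int) (out : List (List (List Int) × Int)) : Decidable (Spec_run_clospan sequences minsup out) := by unfold Spec_run_clospan; infer_instance

-- ===== CLAIM (what is proved, stated in full; the proofs are below) =====
def Claim_equal_run_clospan : Prop := ∀ (sequences : List (List (List Int))) (minsup : Int), Dom_run_clospan sequences minsup → Spec_run_clospan sequences minsup (run_clospan sequences minsup)

-- ===== LEMMAS AND PROOFS =====

-- 'item in seq_iter' never succeeds (cross-type ==) and exhausts the iterator
lemma pvInIter_eq (item : Int) (it : List (List Int)) : pvInIter item it = (false, []) := by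
  induction it with
  | nil => rfl
  | cons s rest ih => simp [pvInIter, pvEqIntItemset, ih]

lemma pvAnyIn_fst (pat : List Int) (it : List (List Int)) : (pvAnyIn pat it).1 = false := by
  induction pat generalizing it with
  | nil => rfl
  | cons i is' ih => simp [pvAnyIn, pvInIter_eq, ih]

lemma isSubsequenceA_cons (p : List Int) (ps : List (List Int)) (it : List (List Int)) :
    isSubsequenceA (p :: ps) it = false := by
  have h := pvAnyIn_fst p it
  unfold isSubsequenceA
  rcases hpa : pvAnyIn p it with ⟨b, it'⟩
  cases b
  · simp
  · simp [hpa] at h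

-- is_closed is constantly True for the (always nonempty) patterns A checks
lemma isClosedGo_true (cur : List (List Int)) (sup : Int)
    (l : List (List (List Int) × Int)) (h : cur ≠ []) : isClosedGo cur sup l = true := by
  rcases cur with _ | ⟨c, cs⟩
  · exact absurd rfl h
  induction l with
  | nil => rfl
  | cons e rest ih =>
    rcases e with ⟨op, os⟩
    simp only [isClosedGo, isSubsequenceA_cons, ih]
    split <;> simp

lemma isClosedA_true (cur : List (List Int)) (sup : Int)
    (d : PySem.Dict (List (List Int)) Int) (h : cur ≠ []) : isClosedA cur sup d = true :=
  isClosedGo_true cur sup d.items h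

-- both counting loops build the same dict (modify k 0 (·+1) = insert k (getD k 0 + 1))
lemma countItems_eq (db : List (List (List Int))) : countItemsA db = freqItemsB db := by
  rfl

-- matching a single singleton pattern itemset is B's tail_after
lemma matchOne_singleton (x : Int) (l : List (List Int)) : matchOne [x] l = tailAfter x l := by
  induction l with
  | nil => rfl
  | cons s rest ih => simp [matchOne, tailAfter, ih]

lemma matchAll_append (p : List (List Int)) (q : List Int) (it : List (List Int)) :
    matchAll (p ++ [q]) it =
      match matchAll p it with
      | none => none
      | some it' => matchOne q it' := by
  induction p generalizing it with
  | nil =>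
    simp only [List.nil_append, matchAll]
    rcases matchOne q it with _ | it' <;> simp
  | cons h t ih =>
    simp only [List.cons_append, matchAll]
    rcases hm : matchOne h it with _ | it' <;> simp [ih]

-- extending the pattern by [x] = projecting the pattern's projected db by x
lemma build_append (p : List (List Int)) (x : Int) (S : List (List (List Int))) :
    buildProjectedDb (p ++ [[x]]) S = projectDb x (buildProjectedDb p S) := by
  induction S with
  | nil => rfl
  | cons seq rest ih =>
    simp only [buildProjectedDb, matchAll_append, matchOne_singleton]
    rcases hm : matchAll p seq with _ | rem
    · simpa using ih
    · by_cases hre : rem.isEmpty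
      · have : rem = [] := by simpa [List.isEmpty_iff] using hre
        subst this
        simpa [tailAfter] using ih
      · rcases ht : tailAfter x rem with _ | r
        · simp [hre, projectDb, ht, ih]
        · simp [hre, projectDb, ht, ih]

-- at the root B projects the raw sequence list; empty sequences never match
lemma build_single (x : Int) (S : List (List (List Int))) :
    buildProjectedDb [[x]] S = projectDb x S := by
  induction S with
  | nil => rfl
  | cons seq rest ih =>
    simp only [buildProjectedDb, projectDb, matchAll, matchOne_singleton]
    rcases tailAfter x seq with _ | r <;> simp [ih]

-- main invariant: if extending pref's projected db agrees with projecting db,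
-- A's extend_pattern and B's mine coincide for every fuel and accumulator
lemma extend_eq (sequences : List (List (List Int))) (minsup : Int) :
    ∀ (fuel : Nat) (pref : List (List Int)) (db : List (List (List Int)))
      (d : PySem.Dict (List (List Int)) Int),
      (∀ x, buildProjectedDb (pref ++ [[x]]) sequences = projectDb x db) →
      extendA sequences minsup fuel pref db d = mineB minsup fuel pref db d := by
  intro fuel
  induction fuel with
  | zero => intro _ _ _ _; rfl
  | succ fuel ih =>
    intro pref db d hdb
    simp only [extendA, mineB, countItems_eq]
    generalize (freqItemsB db).items = l
    induction l generalizing d with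
    | nil => rfl
    | cons xc rest ihl =>
      simp only [List.foldl_cons]
      by_cases hc : xc.2 ≥ minsup
      · simp only [hc, if_pos]
        rw [isClosedA_true (pref ++ [[xc.1]]) xc.2 d (by simp), if_pos rfl, hdb xc.1,
          ih (pref ++ [[xc.1]]) (projectDb xc.1 db) (d.insert (pref ++ [[xc.1]]) xc.2)
            (fun y => by rw [build_append, hdb xc.1])]
        exact ihl _
      · simp only [hc, ite_false]
        exact ihl d

-- ===== VERDICT (by name: the statement is the Claim_ definition above) =====
theorem run_clospan_spec : Claim_equal_run_clospan := by
  intro sequences minsup _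
  unfold Spec_run_clospan run_clospan run_clospan_alt
  rw [extend_eq sequences minsup (pvFuel sequences) [] sequences PySem.Dict.empty
    (fun x => by simpa using build_single x sequences)]
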